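-- pv_equiv track=rewrite | github.com/Micheleww/scc2 | scc-top/tools/scc/ops/quarantine_untracked.py | _decode_git_path
-- ===== SOURCE A (Python) =====
-- def _decode_git_path(s: str) -> str:
--     s = str(s or "").strip()
--     if len(s) >= 2 and s[0] == '"' and s[-1] == '"':
--         inner = s[1:-1]
--         out_bytes = bytearray()
--         i = 0
--         while i < len(inner):
--             ch = inner[i]
--             if ch != "\\":
--                 out_bytes.extend(ch.encode("utf-8", errors="replace"))
--                 i += 1
--                 continue
--             i += 1
--             if i >= len(inner):
--                 out_bytes.extend(b"\\")
--                 break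
--             esc = inner[i]
--             if esc in {'\\', '"'}:
--                 out_bytes.extend(esc.encode("utf-8"))
--                 i += 1
--                 continue
--             if esc == "n":
--                 out_bytes.extend(b"\n")
--                 i += 1
--                 continue
--             if esc == "t":
--                 out_bytes.extend(b"\t")
--                 i += 1
--                 continue
--             if esc == "r":
--                 out_bytes.extend(b"\r")
--                 i += 1
--                 continue
--             if esc.isdigit():
--                 j = i
--                 digits = []
--                 while j < len(inner) and len(digits) < 3 and inner[j].isdigit():
--                     digits.append(inner[j])
--                     j += 1
--                 try:
--                     out_bytes.append(int("".join(digits), 8) & 0xFF)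
--                 except Exception:
--                     out_bytes.extend(("\\ " + "".join(digits)).encode("utf-8", errors="replace"))
--                 i = j
--                 continue
--             out_bytes.extend(("\\" + esc).encode("utf-8", errors="replace"))
--             i += 1
--         try:
--             return out_bytes.decode("utf-8", errors="replace")
--         except Exception:
--             return inner
--     return s
-- ===== SOURCE B (Python) =====
-- def _decode_git_path(s: str) -> str:
--     # Partition-driven decoder: split the quoted body at backslashes with
--     # str.partition and emit byte chunks per escape, instead of a manual
--     # index/while loop over single characters.
--     s = str(s or "").strip()
--     if not (len(s) >= 2 and s[0] == '"' and s[-1] == '"'):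
--         return s
--
--     def chunks(t):
--         while t:
--             head, sep, t = t.partition("\\")
--             yield head.encode("utf-8", errors="replace")
--             if not sep:
--                 return
--             if not t:
--                 yield b"\\"
--                 return
--             esc, t = t[0], t[1:]
--             if esc == "\\" or esc == '"':
--                 yield esc.encode("utf-8")
--             elif esc == "n":
--                 yield b"\n"
--             elif esc == "t":
--                 yield b"\t"
--             elif esc == "r":
--                 yield b"\r"
--             elif esc.isdigit():
--                 extra = ""
--                 for c in t[:2]:
--                     if not c.isdigit():
--                         break
--                     extra += c
--                 digits = esc + extra
--                 t = t[len(extra):]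
--                 if all(c in "01234567" for c in digits):
--                     v = 0
--                     for c in digits:
--                         v = v * 8 + (ord(c) - 48)
--                     yield bytes([v & 0xFF])
--                 else:
--                     yield ("\\ " + digits).encode("utf-8", errors="replace")
--             else:
--                 yield ("\\" + esc).encode("utf-8", errors="replace")
--
--     return b"".join(chunks(s[1:-1])).decode("utf-8", errors="replace")
-- ===== Notes on version B (the rewrite author's own statement) =====
-- stated objective: alternative
-- what changed: A's manual index/while loop with per-character continue/jump bookkeeping is replaced by a partition-driven decoder: a generator repeatedly splits the quoted body at the next backslash with str.partition, yields one byte chunk per literal run or escape (octal value computed arithmetically with an explicit 0-7 digit check instead of try/except around int(.,8)), and the chunks are joined and decoded once.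
import Mathlib
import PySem

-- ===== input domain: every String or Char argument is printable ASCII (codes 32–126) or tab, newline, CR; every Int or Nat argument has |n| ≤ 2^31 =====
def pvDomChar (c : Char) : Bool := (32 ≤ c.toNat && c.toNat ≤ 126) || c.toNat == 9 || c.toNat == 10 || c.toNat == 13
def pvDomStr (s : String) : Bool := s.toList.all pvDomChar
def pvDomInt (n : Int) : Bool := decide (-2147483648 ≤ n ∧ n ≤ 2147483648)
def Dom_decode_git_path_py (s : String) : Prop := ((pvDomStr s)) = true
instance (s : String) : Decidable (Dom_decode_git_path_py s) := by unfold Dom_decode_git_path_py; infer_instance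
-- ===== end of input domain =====

-- B replaces A's manual index/while loop over single characters by a partition-driven
-- chunk decoder (str.partition at each backslash, emitting byte chunks that are joined);
-- objective: alternative decomposition, same cost.

-- ===== SHARED LIBRARY-CALL HELPERS (both Pythons call the same builtins) =====

-- c.encode("utf-8") of one character (exact UTF-8; errors="replace" only differs on
-- surrogates, which a Lean Char can never be)
def pvEncChar (c : Char) : List Nat :=
  let n := c.toNat
  if n < 0x80 then [n]
  else if n < 0x800 then [0xC0 + n / 64, 0x80 + n % 64]
  else if n < 0x10000 then [0xE0 + n / 4096, 0x80 + n / 64 % 64, 0x80 + n % 64]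
  else [0xF0 + n / 262144, 0x80 + n / 4096 % 64, 0x80 + n / 64 % 64, 0x80 + n % 64]

-- str.encode("utf-8") of a run of characters
def pvEnc (cs : List Char) : List Nat := cs.flatMap pvEncChar

def pvCont (b : Nat) : Bool := 0x80 ≤ b && b ≤ 0xBF

-- bytes.decode("utf-8", errors="replace"): CPython's decoder, one U+FFFD per maximal
-- subpart of an ill-formed sequence (exact; cross-checked against CPython)
def pvUtf8Replace (l : List Nat) : List Char :=
  match l with
  | [] => []
  | b :: rest =>
    if b < 0x80 then Char.ofNat b :: pvUtf8Replace rest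
    else if 0xC2 ≤ b ∧ b ≤ 0xDF then
      match rest with
      | c :: r2 =>
        if pvCont c then Char.ofNat ((b - 0xC0) * 64 + (c - 0x80)) :: pvUtf8Replace r2
        else '\uFFFD' :: pvUtf8Replace (c :: r2)
      | [] => ['\uFFFD']
    else if 0xE0 ≤ b ∧ b ≤ 0xEF then
      let lo := if b = 0xE0 then 0xA0 else 0x80
      let hi := if b = 0xED then 0x9F else 0xBF
      match rest with
      | c :: r2 =>
        if lo ≤ c ∧ c ≤ hi then
          match r2 with
          | d :: r3 =>
            if pvCont d then
              Char.ofNat ((b - 0xE0) * 4096 + (c - 0x80) * 64 + (d - 0x80)) :: pvUtf8Replace r3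
            else '\uFFFD' :: pvUtf8Replace (d :: r3)
          | [] => ['\uFFFD']
        else '\uFFFD' :: pvUtf8Replace (c :: r2)
      | [] => ['\uFFFD']
    else if 0xF0 ≤ b ∧ b ≤ 0xF4 then
      let lo := if b = 0xF0 then 0x90 else 0x80
      let hi := if b = 0xF4 then 0x8F else 0xBF
      match rest with
      | c :: r2 =>
        if lo ≤ c ∧ c ≤ hi then
          match r2 with
          | d :: r3 =>
            if pvCont d then
              match r3 with
              | e :: r4 =>
                if pvCont e then
                  Char.ofNat ((b - 0xF0) * 262144 + (c - 0x80) * 4096 + (d - 0x80) * 64 + (e - 0x80))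
                    :: pvUtf8Replace r4
                else '\uFFFD' :: pvUtf8Replace (e :: r4)
              | [] => ['\uFFFD']
            else '\uFFFD' :: pvUtf8Replace (d :: r3)
          | [] => ['\uFFFD']
        else '\uFFFD' :: pvUtf8Replace (c :: r2)
      | [] => ['\uFFFD']
    else '\uFFFD' :: pvUtf8Replace rest
  termination_by l.length
  decreasing_by all_goals (simp; try omega)

-- ===== PORT A =====

-- A's inner digit-collecting while loop (j, digits), started with len(digits) = n
def pvADigits (cs : List Char) (n : Nat) : List Char :=
  match cs with
  | [] => []
  | c :: r => if n < 3 ∧ PySem.Chars.isdigit c then c :: pvADigits r (n + 1) else []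

-- A's main while loop over inner, accumulating out_bytes
def pvALoop (cs : List Char) (out : List Nat) : List Nat :=
  match cs with
  | [] => out
  | ch :: rest =>
    if ch ≠ '\\' then pvALoop rest (out ++ pvEncChar ch)
    else
      match rest with
      | [] => out ++ [92]
      | esc :: r2 =>
        if esc = '\\' ∨ esc = '"' then pvALoop r2 (out ++ pvEncChar esc)
        else if esc = 'n' then pvALoop r2 (out ++ [10])
        else if esc = 't' then pvALoop r2 (out ++ [9])
        else if esc = 'r' then pvALoop r2 (out ++ [13])
        else if PySem.Chars.isdigit esc then
          let digits := esc :: pvADigits r2 1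
          let newOut :=
            match PySem.Int.ofCharsBase? digits 8 with  -- int("".join(digits), 8)
            | some v => out ++ [(PySem.Int.band v 255).toNat]
            | none => out ++ pvEnc ('\\' :: ' ' :: digits)
          pvALoop (r2.drop (pvADigits r2 1).length) newOut
        else pvALoop r2 (out ++ pvEnc ['\\', esc])
  termination_by cs.length
  decreasing_by all_goals (simp_all; try omega)

def decode_git_path_py (s : String) : String :=
  let s1 := PySem.Str.strip (if s = "" then "" else s)   -- str(s or "").strip()
  let cs := s1.toList
  if 2 ≤ cs.length ∧ PySem.List.pyGet? cs 0 = some '"' ∧ PySem.List.pyGet? cs (-1) = some '"' then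
    -- the try/except around .decode is dead code: errors="replace" never raises
    String.mk (pvUtf8Replace (pvALoop (PySem.List.slice cs (some 1) (some (-1))) []))
  else s1

-- ===== PORT B =====

-- B's generator `chunks`: partition at the first backslash (= takeWhile/dropWhile),
-- yield one byte chunk per literal run / escape
def pvBChunks (t : List Char) : List (List Nat) :=
  if t = [] then []
  else
    pvEnc (t.takeWhile (fun c => c ≠ '\\')) ::
      match hr : t.dropWhile (fun c => c ≠ '\\') with
      | [] => []                 -- no separator found: yield head, return
      | _ :: r2 =>               -- the '\' separator
        match r2 with
        | [] => [[92]]           -- trailing backslash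
        | esc :: t1 =>
          if esc = '\\' ∨ esc = '"' then pvEncChar esc :: pvBChunks t1
          else if esc = 'n' then [10] :: pvBChunks t1
          else if esc = 't' then [9] :: pvBChunks t1
          else if esc = 'r' then [13] :: pvBChunks t1
          else if PySem.Chars.isdigit esc then
            let extra := (t1.take 2).takeWhile PySem.Chars.isdigit
            let digits := esc :: extra
            let t2 := t1.drop extra.length
            if digits.all (fun c => PySem.Chars.isIn [c] "01234567".toList) then
              [(digits.foldl (fun a c => a * 8 + (c.toNat - 48)) 0) &&& 255] :: pvBChunks t2
            else pvEnc ('\\' :: ' ' :: digits) :: pvBChunks t2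
          else pvEnc ['\\', esc] :: pvBChunks t1
  termination_by t.length
  decreasing_by all_goals
    (have h := List.length_dropWhile_le (fun c => (c ≠ '\\' : Bool)) t
     rw [hr] at h
     simp_all
     omega)

def decode_git_path_py_alt (s : String) : String :=
  let s1 := PySem.Str.strip (if s = "" then "" else s)   -- str(s or "").strip()
  let cs := s1.toList
  if ¬ (2 ≤ cs.length ∧ PySem.List.pyGet? cs 0 = some '"' ∧ PySem.List.pyGet? cs (-1) = some '"') then s1
  else
    String.mk (pvUtf8Replace ((pvBChunks (PySem.List.slice cs (some 1) (some (-1)))).flatten))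

-- ===== PRECONDITION & SPEC =====
def Spec_decode_git_path_py (s : String) (out : String) : Prop := out = decode_git_path_py_alt s
instance (s : String) (out : String) : Decidable (Spec_decode_git_path_py s out) := by unfold Spec_decode_git_path_py; infer_instance

-- ===== CLAIM (what is proved, stated in full; the proofs are below) =====
def Claim_equal_decode_git_path_py : Prop := ∀ (s : String), Dom_decode_git_path_py s → Spec_decode_git_path_py s (decode_git_path_py s)

-- ===== LEMMAS AND PROOFS =====

-- A's digit loop is take-while-capped-at-3
theorem pvADigits_eq (cs : List Char) (n : Nat) :
    pvADigits cs n = (cs.take (3 - n)).takeWhile PySem.Chars.isdigit := by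
  induction cs generalizing n with
  | nil => simp [pvADigits]
  | cons c r ih =>
    rw [pvADigits]
    by_cases hn : n < 3
    · by_cases hd : PySem.Chars.isdigit c
      · have h3 : 3 - n = (3 - (n + 1)) + 1 := by omega
        simp [hn, hd, h3, ih]
      · have h3 : ∃ k, 3 - n = k + 1 := ⟨3 - (n + 1), by omega⟩
        obtain ⟨k, hk⟩ := h3
        simp [hn, hd, hk]
    · have h3 : 3 - n = 0 := by omega
      simp [hn, h3]


-- A-chunk and B-chunk of the octal-escape branch, as named values
def pvAOctBytes (ds : List Char) : List Nat :=
  match PySem.Int.ofCharsBase? ds 8 with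
  | some v => [(PySem.Int.band v 255).toNat]
  | none => pvEnc ('\\' :: ' ' :: ds)

def pvBOctBytes (ds : List Char) : List Nat :=
  if ds.all (fun c => PySem.Chars.isIn [c] "01234567".toList) then
    [(ds.foldl (fun a c => a * 8 + (c.toNat - 48)) 0) &&& 255]
  else pvEnc ('\\' :: ' ' :: ds)

def pvDig (a : Fin 10) : Char := Char.ofNat (48 + a.val)

theorem pvDigit_rep (c : Char) (h : PySem.Chars.isdigit c = true) : ∃ a : Fin 10, c = pvDig a := by
  simp [PySem.Chars.isdigit] at h
  obtain ⟨h1, h2⟩ := h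
  have l1 : 48 ≤ c.toNat := h1
  have l2 : c.toNat ≤ 57 := h2
  refine ⟨⟨c.toNat - 48, by omega⟩, ?_⟩
  have : 48 + (c.toNat - 48) = c.toNat := by omega
  simp [pvDig, this, Char.ofNat_toNat]

theorem pvOct1 : ∀ a : Fin 10, pvAOctBytes [pvDig a] = pvBOctBytes [pvDig a] := by decide
theorem pvOct2 : ∀ a b : Fin 10, pvAOctBytes [pvDig a, pvDig b] = pvBOctBytes [pvDig a, pvDig b] := by decide
theorem pvOct3 : ∀ a b c : Fin 10, pvAOctBytes [pvDig a, pvDig b, pvDig c] = pvBOctBytes [pvDig a, pvDig b, pvDig c] := by decide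

theorem pvOctBytes_eq (ds : List Char) (h1 : ds ≠ []) (h2 : ds.length ≤ 3)
    (h3 : ∀ c ∈ ds, PySem.Chars.isdigit c = true) : pvAOctBytes ds = pvBOctBytes ds := by
  match ds, h1 with
  | [a], _ =>
    obtain ⟨x, rfl⟩ := pvDigit_rep a (h3 a (by simp))
    exact pvOct1 x
  | [a, b], _ =>
    obtain ⟨x, rfl⟩ := pvDigit_rep a (h3 a (by simp))
    obtain ⟨y, rfl⟩ := pvDigit_rep b (h3 b (by simp))
    exact pvOct2 x y
  | [a, b, c], _ =>
    obtain ⟨x, rfl⟩ := pvDigit_rep a (h3 a (by simp))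
    obtain ⟨y, rfl⟩ := pvDigit_rep b (h3 b (by simp))
    obtain ⟨z, rfl⟩ := pvDigit_rep c (h3 c (by simp))
    exact pvOct3 x y z
  | a :: b :: c :: d :: r, _ => simp at h2; omega

theorem pvALoop_oct_newOut (ds : List Char) (out : List Nat) :
    (match PySem.Int.ofCharsBase? ds 8 with
     | some v => out ++ [(PySem.Int.band v 255).toNat]
     | none => out ++ pvEnc ('\\' :: ' ' :: ds)) = out ++ pvAOctBytes ds := by
  cases h : PySem.Int.ofCharsBase? ds 8 <;> simp [pvAOctBytes, h]

theorem pv_dropWhile_head (p : Char → Bool) :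
    ∀ (t : List Char) (x : Char) (r : List Char), t.dropWhile p = x :: r → p x = false := by
  intro t
  induction t with
  | nil => intro x r h; simp [List.dropWhile] at h
  | cons c cs ih =>
    intro x r h
    by_cases hp : p c
    · rw [List.dropWhile_cons_of_pos hp] at h; exact ih x r h
    · rw [List.dropWhile_cons_of_neg hp] at h
      obtain ⟨rfl, -⟩ := List.cons.inj h
      simpa using hp

-- A consumes a backslash-free run one character at a time
theorem pvALoop_run (t : List Char) (out : List Nat) :
    pvALoop t out
      = pvALoop (t.dropWhile (fun c => c ≠ '\\')) (out ++ pvEnc (t.takeWhile (fun c => c ≠ '\\'))) := by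
  induction t generalizing out with
  | nil => simp [pvEnc]
  | cons c r ih =>
    by_cases hc : c = '\\'
    · simp [hc, pvEnc]
    · rw [pvALoop.eq_def]
      simp only [hc, ne_eq, not_false_iff, if_true, List.takeWhile_cons, List.dropWhile_cons]
      simp [pvEnc, ih (out ++ pvEncChar c), List.append_assoc]

theorem pvMainAux : ∀ n (t : List Char) (out : List Nat), t.length ≤ n →
    pvALoop t out = out ++ (pvBChunks t).flatten := by
  intro n
  induction n with
  | zero =>
    intro t out hlen
    have : t = [] := by cases t <;> simp_all
    subst this
    simp [pvALoop, pvBChunks]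
  | succ n ih =>
    intro t out hlen
    by_cases ht : t = []
    · subst ht; simp [pvALoop, pvBChunks]
    rw [pvALoop_run t out, pvBChunks]
    simp only [ht, if_false]
    have hdlen := List.length_dropWhile_le (fun c => (c ≠ '\\' : Bool)) t
    split
    · -- dropWhile t = []: no backslash in t
      next heq =>
      rw [heq]
      rw [pvALoop.eq_def]
      simp
    · next x r2 heq =>
      have hx : x = '\\' := by
        have := pv_dropWhile_head (fun c => c ≠ '\\') t x r2 heq
        simpa using this
      subst hx
      rw [heq] at hdlen
      conv_lhs => rw [heq]
      cases r2 with
      | nil =>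
        rw [pvALoop.eq_def]; simp
      | cons esc t1 =>
        simp only [List.length_cons] at hdlen
        have ht1 : t1.length ≤ n := by omega
        rw [pvALoop.eq_def]
        simp only [ne_eq, not_true_eq_false, if_false]
        by_cases h1 : esc = '\\' ∨ esc = '"'
        · simp [h1, ih t1 _ ht1, List.append_assoc]
        · by_cases h2 : esc = 'n'
          · simp [h2, ih t1 _ ht1, List.append_assoc]
          · by_cases h3 : esc = 't'
            · simp [h3, ih t1 _ ht1, List.append_assoc]
            · by_cases h4 : esc = 'r'
              · simp [h4, ih t1 _ ht1, List.append_assoc]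
              · by_cases h5 : PySem.Chars.isdigit esc
                · -- octal-escape branch
                  have hdig : pvADigits t1 1 = (t1.take 2).takeWhile PySem.Chars.isdigit := by
                    simpa using pvADigits_eq t1 1
                  have hlen3 : (esc :: (t1.take 2).takeWhile PySem.Chars.isdigit).length ≤ 3 := by
                    have h6 := (List.takeWhile_sublist (p := PySem.Chars.isdigit) (l := t1.take 2)).length_le
                    have h7 := List.length_take_le 2 t1
                    simp only [List.length_cons]
                    omega
                  have hall : ∀ c ∈ esc :: (t1.take 2).takeWhile PySem.Chars.isdigit,
                      PySem.Chars.isdigit c = true := by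
                    intro c hc
                    rcases List.mem_cons.mp hc with rfl | hc
                    · exact h5
                    · exact List.mem_takeWhile_imp hc
                  have hoct := pvOctBytes_eq (esc :: (t1.take 2).takeWhile PySem.Chars.isdigit)
                    (by simp) hlen3 hall
                  have ht2 : (t1.drop ((t1.take 2).takeWhile PySem.Chars.isdigit).length).length ≤ n := by
                    simp only [List.length_drop]
                    omega
                  simp only [h1, h2, h3, h4, h5, if_true, if_false, hdig]
                  rw [pvALoop_oct_newOut, ih _ _ ht2, hoct]
                  simp only [pvBOctBytes]
                  split_ifs <;> simp [List.append_assoc]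
                · simp [h1, h2, h3, h4, h5, ih t1 _ ht1, List.append_assoc]

theorem decode_git_path_py_spec : Claim_equal_decode_git_path_py := by
  unfold Claim_equal_decode_git_path_py
  intro s _
  unfold Spec_decode_git_path_py decode_git_path_py decode_git_path_py_alt
  by_cases hg : 2 ≤ (PySem.Str.strip (if s = "" then "" else s)).toList.length ∧
      PySem.List.pyGet? (PySem.Str.strip (if s = "" then "" else s)).toList 0 = some '"' ∧
      PySem.List.pyGet? (PySem.Str.strip (if s = "" then "" else s)).toList (-1) = some '"'
  · rw [if_pos hg, if_neg (not_not_intro hg)]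
    rw [pvMainAux (PySem.List.slice (PySem.Str.strip (if s = "" then "" else s)).toList (some 1) (some (-1))).length _ [] le_rfl]
    simp
  · rw [if_neg hg, if_pos hg]
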